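-- pv_equiv track=rewrite | github.com/TatyanaV/Genome_Sequencing_Bioinformatics_II | OverlapGraph.py | build_prefix_graph
-- ===== SOURCE A (Python) =====
-- from builtins import dict, open
--
-- def build_prefix_graph(kmers):
--     graph = dict()
--
--     for kmer in kmers:
--         prefix = kmer[:-1]
--         if prefix in graph:
--             graph[prefix].append(kmer)
--         else:
--             graph[prefix] = [kmer]
--
--     return graph
-- ===== SOURCE B (Python) =====
-- def build_prefix_graph(kmers):
--     # Idiomatic two-pass rewrite: collect the distinct prefixes in first-occurrence
--     # order, then build each group with a filtering comprehension over kmers.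
--     prefixes = dict.fromkeys(k[:-1] for k in kmers)
--     return {p: [k for k in kmers if k[:-1] == p] for p in prefixes}
-- ===== Notes on version B (the rewrite author's own statement) =====
-- stated objective: idiomatic
-- what changed: Replaces the single hash pass that appends each kmer to its bucket with a two-pass dict/set-comprehension build: first dedup the prefixes in first-occurrence order (dict.fromkeys), then construct each group by filtering kmers once per distinct prefix.
import Mathlib
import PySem

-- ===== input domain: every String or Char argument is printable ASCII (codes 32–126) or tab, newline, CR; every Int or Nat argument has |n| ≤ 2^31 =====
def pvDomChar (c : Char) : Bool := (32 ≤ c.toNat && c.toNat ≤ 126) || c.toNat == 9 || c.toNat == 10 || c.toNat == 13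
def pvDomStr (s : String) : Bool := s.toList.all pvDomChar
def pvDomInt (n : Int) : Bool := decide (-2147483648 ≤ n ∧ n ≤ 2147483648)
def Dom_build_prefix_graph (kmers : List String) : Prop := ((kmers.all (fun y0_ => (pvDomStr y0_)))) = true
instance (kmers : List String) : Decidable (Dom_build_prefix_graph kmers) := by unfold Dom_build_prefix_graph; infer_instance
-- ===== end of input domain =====

-- B replaces A's single append-per-kmer hash pass by an idiomatic two-pass build
-- (ordered dedup of prefixes, then one filter per distinct prefix); same result, no speed claim.


-- ===== PORT A =====
def build_prefix_graph (kmers : List String) : List (String × List String) :=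
  (kmers.foldl (fun graph kmer =>
      let pfx := PySem.Str.slice kmer none (some (-1))
      if graph.contains pfx then
        graph.insert pfx (graph.getD pfx [] ++ [kmer])   -- graph[prefix].append(kmer)
      else
        graph.insert pfx [kmer])                          -- graph[prefix] = [kmer]
    PySem.Dict.empty).items

-- ===== PORT B =====
def build_prefix_graph_alt (kmers : List String) : List (String × List String) :=
  let prefixes := PySem.List.dedup (kmers.map (fun k => PySem.Str.slice k none (some (-1))))
  prefixes.map (fun p =>
    (p, kmers.filter (fun k => PySem.Str.slice k none (some (-1)) == p)))

-- ===== PRECONDITION & SPEC =====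
def Spec_build_prefix_graph (kmers : List String) (out : List (String × List String)) : Prop := out = build_prefix_graph_alt kmers
instance (kmers : List String) (out : List (String × List String)) : Decidable (Spec_build_prefix_graph kmers out) := by unfold Spec_build_prefix_graph; infer_instance

-- ===== CLAIM (what is proved, stated in full; the proofs are below) =====
def Claim_equal_build_prefix_graph : Prop := ∀ (kmers : List String), Dom_build_prefix_graph kmers → Spec_build_prefix_graph kmers (build_prefix_graph kmers)

-- ===== LEMMAS AND PROOFS =====

-- A's per-kmer step (lookup-append vs fresh singleton) is exactly a Dict.modify with default [].
theorem pv_step_eq (d : PySem.Dict String (List String)) (k p : String) :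
    (if d.contains p then d.insert p (d.getD p [] ++ [k]) else d.insert p [k])
      = d.modify p [] (· ++ [k]) := by
  by_cases h : d.contains p = true
  · simp [h, PySem.Dict.modify]
  · have hg : d.getD p [] = [] := PySem.Dict.getD_of_not_contains d [] (by simpa using h)
    simp [h, PySem.Dict.modify, hg]

-- ===== VERDICT (by name: the statement is the Claim_ definition above) =====
theorem build_prefix_graph_spec : Claim_equal_build_prefix_graph := by
  unfold Claim_equal_build_prefix_graph Spec_build_prefix_graph
  intro kmers _
  unfold build_prefix_graph build_prefix_graph_alt
  -- rewrite A's fold into the canonical modify-fold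
  have hfold :
      kmers.foldl (fun graph kmer =>
        let pfx := PySem.Str.slice kmer none (some (-1))
        if graph.contains pfx then
          graph.insert pfx (graph.getD pfx [] ++ [kmer])
        else graph.insert pfx [kmer]) PySem.Dict.empty
      = kmers.foldl (fun d k =>
          d.modify (PySem.Str.slice k none (some (-1))) [] (· ++ [k])) PySem.Dict.empty := by
    congr 1
    funext d k
    exact pv_step_eq d k _
  rw [hfold]
  set F := fun (d : PySem.Dict String (List String)) (k : String) =>
    d.modify (PySem.Str.slice k none (some (-1))) [] (· ++ [k]) with hF
  have hkeys : (kmers.foldl F PySem.Dict.empty).keys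
      = PySem.Set.ofList (kmers.map (fun k => PySem.Str.slice k none (some (-1)))) := by
    rw [hF]
    rw [PySem.Dict.keys_foldl_modify_key kmers
      (fun k => PySem.Str.slice k none (some (-1))) [] (fun _ k v => v ++ [k]) PySem.Dict.empty]
    simp [PySem.Set.update_nil_left]
  have hnodup : (kmers.foldl F PySem.Dict.empty).keys.Nodup := by
    rw [hkeys]; exact PySem.Set.nodup_ofList _
  have hgetD : ∀ c, (kmers.foldl F PySem.Dict.empty).getD c []
      = kmers.filter (fun k => PySem.Str.slice k none (some (-1)) == c) := by
    intro c
    have := PySem.Dict.getD_foldl_modify_append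
      (kmers.map (fun k => (PySem.Str.slice k none (some (-1)), k))) PySem.Dict.empty c
    rw [List.foldl_map] at this
    simp only [hF]
    rw [this]
    simp [List.filter_map, Function.comp_def, List.map_map]
  rw [PySem.Dict.items_eq_map_keys _ hnodup []]
  rw [hkeys]
  simp only [PySem.List.dedup_eq_ofList]
  apply List.map_congr_left
  intro p _
  exact congrArg (Prod.mk p) (hgetD p)
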